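-- pv_equiv track=rewrite | github.com/Sinuabe96/Lest-Solve-Problems | Lidiya Pyton/A_Digits_Sum.py | count_interesting_numbers
-- ===== SOURCE A (Python) =====
-- def count_interesting_numbers(t, test_cases):
--     results = []
--
--     for n in test_cases:
--         count = 0
--         x = 1
--
--         while x <= n:
--             sum_x = sum(map(int, str(x)))
--             sum_x_plus_1 = sum(map(int, str(x + 1)))
--
--             if sum_x_plus_1 < sum_x:
--                 count += 1
--
--             x += 1
--
--         results.append(count)
--
--     return results
-- ===== SOURCE B (Python) =====
-- def count_interesting_numbers(t, test_cases):
--     # Closed form: digitsum(x+1) < digitsum(x) exactly when x ends in 9,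
--     # so the count for n is the number of multiples-of-10-minus-1 in [1, n].
--     return [(n + 1) // 10 if n > 0 else 0 for n in test_cases]
-- ===== Notes on version B (the rewrite author's own statement) =====
-- stated objective: faster
-- what changed: Replaces the per-test brute-force scan of 1..n with digit-sum recomputation by the closed form (n+1)//10 (count of x ending in 9), one arithmetic expression per test case.
import Mathlib
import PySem

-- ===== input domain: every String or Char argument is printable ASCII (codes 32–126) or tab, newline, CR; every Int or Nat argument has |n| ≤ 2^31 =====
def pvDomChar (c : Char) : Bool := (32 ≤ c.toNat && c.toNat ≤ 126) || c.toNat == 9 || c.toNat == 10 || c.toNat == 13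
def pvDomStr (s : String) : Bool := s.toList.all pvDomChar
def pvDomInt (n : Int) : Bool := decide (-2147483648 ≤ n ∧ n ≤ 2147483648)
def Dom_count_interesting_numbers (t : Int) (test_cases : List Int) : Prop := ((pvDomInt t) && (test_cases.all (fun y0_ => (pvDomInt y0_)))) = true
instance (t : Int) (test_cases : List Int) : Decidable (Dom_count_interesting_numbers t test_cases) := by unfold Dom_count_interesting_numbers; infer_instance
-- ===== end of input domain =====

-- B replaces A's per-test scan of 1..n with digit sums by the closed form (n+1)//10; objective: faster.

-- ===== PORT A =====
-- int(c) for a one-character string; in A the character is always a decimal digit, so the getD default is never reached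
def pvCharInt (c : Char) : Int := (PySem.Int.ofChars? [c]).getD 0

-- sum(map(int, str(x)))
def pvDigitSum (x : Int) : Int := ((PySem.Int.toChars x).map pvCharInt).sum

-- the inner 'while x <= n' loop of A
def pvLoopA (n x count : Int) : Int :=
  if _h : x ≤ n then
    pvLoopA n (x + 1) (if pvDigitSum (x + 1) < pvDigitSum x then count + 1 else count)
  else count
termination_by (n + 1 - x).toNat
decreasing_by omega

def count_interesting_numbers (t : Int) (test_cases : List Int) : List Int :=
  test_cases.foldl (fun results n => results ++ [pvLoopA n 1 0]) []

-- ===== PORT B =====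
def count_interesting_numbers_alt (t : Int) (test_cases : List Int) : List Int :=
  test_cases.map (fun n => if 0 < n then PySem.Int.floordiv (n + 1) 10 else 0)

-- ===== PRECONDITION & SPEC =====
def Spec_count_interesting_numbers (t : Int) (test_cases : List Int) (out : List Int) : Prop := out = count_interesting_numbers_alt t test_cases
instance (t : Int) (test_cases : List Int) (out : List Int) : Decidable (Spec_count_interesting_numbers t test_cases out) := by unfold Spec_count_interesting_numbers; infer_instance

-- ===== CLAIM (what is proved, stated in full; the proofs are below) =====
def Claim_equal_count_interesting_numbers : Prop := ∀ (t : Int) (test_cases : List Int), Dom_count_interesting_numbers t test_cases → Spec_count_interesting_numbers t test_cases (count_interesting_numbers t test_cases)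

-- ===== LEMMAS AND PROOFS =====

-- recursive decimal digit sum on Nat
def sdNat (n : Nat) : Nat :=
  if h : n < 10 then n else n % 10 + sdNat (n / 10)
termination_by n
decreasing_by exact Nat.div_lt_self (by omega) (by omega)

theorem sdNat_lt10 {n : Nat} (h : n < 10) : sdNat n = n := by
  rw [sdNat]; simp [h]

theorem sdNat_ge10 {n : Nat} (h : 10 ≤ n) : sdNat n = n % 10 + sdNat (n / 10) := by
  rw [sdNat]; simp [Nat.not_lt.mpr h]

theorem pvCharInt_digitChar {m : Nat} (h : m < 10) : pvCharInt (Nat.digitChar m) = (m : Int) := by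
  interval_cases m <;> decide

def pvCharSum (l : List Char) : Int := (l.map pvCharInt).sum

theorem charSum_toDigitsCore : ∀ (fuel n : Nat) (ds : List Char), n < fuel →
    pvCharSum (Nat.toDigitsCore 10 fuel n ds) = (sdNat n : Int) + pvCharSum ds := by
  intro fuel
  induction fuel with
  | zero => intro n ds h; omega
  | succ fuel ih =>
    intro n ds h
    rw [Nat.toDigitsCore]
    by_cases h0 : n / 10 = 0
    · have hn : n < 10 := by omega
      simp only [h0, if_true]
      have : pvCharSum (Nat.digitChar (n % 10) :: ds) = pvCharInt (Nat.digitChar (n % 10)) + pvCharSum ds := by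
        simp [pvCharSum]
      rw [this, pvCharInt_digitChar (by omega), sdNat_lt10 hn]
      have : n % 10 = n := Nat.mod_eq_of_lt hn
      rw [this]
    · simp only [if_neg h0]
      have h10 : 10 ≤ n := by omega
      rw [ih (n / 10) _ (by omega)]
      have : pvCharSum (Nat.digitChar (n % 10) :: ds) = pvCharInt (Nat.digitChar (n % 10)) + pvCharSum ds := by
        simp [pvCharSum]
      rw [this, pvCharInt_digitChar (by omega), sdNat_ge10 h10]
      push_cast
      ring

theorem digitSum_eq (x : Int) (hx : 0 ≤ x) : pvDigitSum x = (sdNat x.toNat : Int) := by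
  have hneg : ¬ x < 0 := by omega
  show pvCharSum (PySem.Int.toChars x) = _
  rw [PySem.Int.toChars, if_neg hneg, Nat.toDigits,
    charSum_toDigitsCore _ _ _ (by omega)]
  simp [pvCharSum]

theorem sd_succ_not9 {n : Nat} (h : n % 10 ≠ 9) : sdNat (n + 1) = sdNat n + 1 := by
  by_cases h9 : n < 9
  · rw [sdNat_lt10 (by omega), sdNat_lt10 (by omega)]
  · have h10 : 10 ≤ n := by omega
    rw [sdNat_ge10 (by omega), sdNat_ge10 h10]
    have e1 : (n + 1) % 10 = n % 10 + 1 := by omega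
    have e2 : (n + 1) / 10 = n / 10 := by omega
    rw [e1, e2]; omega

theorem sd_succ_le (n : Nat) : sdNat (n + 1) ≤ sdNat n + 1 := by
  induction n using Nat.strong_induction_on with
  | _ n ih =>
    by_cases h : n % 10 = 9
    · by_cases h9 : n = 9
      · subst h9
        rw [sdNat_ge10 (by omega), sdNat_lt10 (by omega), sdNat_lt10 (by omega)]
        omega
      · have h10 : 10 ≤ n := by omega
        have e1 : (n + 1) % 10 = 0 := by omega
        have e2 : (n + 1) / 10 = n / 10 + 1 := by omega
        have hlt : n / 10 < n := Nat.div_lt_self (by omega) (by omega)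
        have := ih (n / 10) hlt
        rw [sdNat_ge10 (by omega), sdNat_ge10 h10, e1, e2]
        omega
    · rw [sd_succ_not9 h]

theorem sd_succ_lt_iff (n : Nat) : sdNat (n + 1) < sdNat n ↔ n % 10 = 9 := by
  constructor
  · intro hlt
    by_contra h
    rw [sd_succ_not9 h] at hlt
    omega
  · intro h
    by_cases h9 : n = 9
    · subst h9
      rw [sdNat_ge10 (by omega), sdNat_lt10 (by omega), sdNat_lt10 (by omega)]
      omega
    · have h10 : 10 ≤ n := by omega
      have e1 : (n + 1) % 10 = 0 := by omega
      have e2 : (n + 1) / 10 = n / 10 + 1 := by omega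
      have := sd_succ_le (n / 10)
      rw [sdNat_ge10 (by omega), sdNat_ge10 h10, e1, e2, h]
      omega

theorem cond_iff (x : Int) (hx : 1 ≤ x) :
    (pvDigitSum (x + 1) < pvDigitSum x) ↔ PySem.Int.mod x 10 = 9 := by
  rw [digitSum_eq x (by omega), digitSum_eq (x + 1) (by omega)]
  have e : (x + 1).toNat = x.toNat + 1 := by omega
  rw [e, PySem.Int.mod_eq_emod_of_pos (by omega)]
  rw [Nat.cast_lt, sd_succ_lt_iff]
  omega

theorem loopA_eq (n : Int) : ∀ (k : Nat) (x count : Int), (n + 1 - x).toNat = k → 1 ≤ x →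
    pvLoopA n x count = count +
      (if x ≤ n then PySem.Int.floordiv (n + 1) 10 - PySem.Int.floordiv x 10 else 0) := by
  intro k
  induction k with
  | zero =>
    intro x count hk hx
    have hxn : ¬ x ≤ n := by omega
    rw [pvLoopA, dif_neg hxn, if_neg hxn]; ring
  | succ k ih =>
    intro x count hk hx
    by_cases hxn : x ≤ n
    · rw [pvLoopA, dif_pos hxn, ih (x + 1) _ (by omega) (by omega)]
      rw [if_pos hxn]
      have hcond := cond_iff x hx
      rw [PySem.Int.floordiv_eq_ediv_of_pos (by omega),
        PySem.Int.floordiv_eq_ediv_of_pos (by omega),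
        PySem.Int.floordiv_eq_ediv_of_pos (by omega)]
      rw [PySem.Int.mod_eq_emod_of_pos (by omega)] at hcond
      by_cases hc : pvDigitSum (x + 1) < pvDigitSum x
      · have h9 : x % 10 = 9 := hcond.mp hc
        rw [if_pos hc]
        split_ifs <;> omega
      · have h9 : ¬ x % 10 = 9 := fun h => hc (hcond.mpr h)
        rw [if_neg hc]
        split_ifs <;> omega
    · rw [pvLoopA, dif_neg hxn, if_neg hxn]; ring

theorem loopA_closed (n : Int) :
    pvLoopA n 1 0 = (if 0 < n then PySem.Int.floordiv (n + 1) 10 else 0) := by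
  rw [loopA_eq n _ 1 0 rfl (by omega)]
  have hf1 : PySem.Int.floordiv 1 10 = 0 := by decide
  by_cases h : (1 : Int) ≤ n
  · rw [if_pos h, if_pos (by omega), hf1]; ring
  · rw [if_neg h, if_neg (by omega)]; ring

-- ===== VERDICT (by name: the statement is the Claim_ definition above) =====
theorem count_interesting_numbers_spec : Claim_equal_count_interesting_numbers := by
  intro t test_cases _dom
  show _ = _
  rw [count_interesting_numbers, count_interesting_numbers_alt,
    PySem.List.foldl_append_singleton_eq_map]
  exact List.map_congr_left fun n _ => loopA_closed n
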